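-- pv_equiv track=rewrite | github.com/bagvendt/SAD2_Project | tools/sequential_popular.py | count_co_actors_for_actor
-- ===== SOURCE A (Python) =====
-- def count_co_actors_for_actor(actor_id, actor_dict, movie_dict):
-- 	movies = actor_dict[actor_id]
-- 	co_actors = {}
-- 	for movie in movies:
-- 		for actor in movie_dict[movie]:
-- 			if actor != actor_id: #playing in a movie with yourself doesn't count
-- 				co_actors[actor] = 1 #set bool flag to signal that actor played with co_actor
-- 	return len(co_actors)
-- ===== SOURCE B (Python) =====
-- def count_co_actors_for_actor(actor_id, actor_dict, movie_dict):
--     all_cast = []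
--     for movie in actor_dict[actor_id]:
--         all_cast.extend(movie_dict[movie])
--     all_cast.sort()
--     count = 0
--     prev = None
--     for a in all_cast:
--         if a != actor_id and a != prev:
--             count += 1
--         prev = a
--     return count
-- ===== Notes on version B (the rewrite author's own statement) =====
-- stated objective: alternative
-- what changed: B uses sort-then-scan instead of a dedup container: it concatenates all casts into one list, sorts it, and counts distinct co-actors in a single linear scan comparing each element to its predecessor, with no set/dict at all.
import Mathlib
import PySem

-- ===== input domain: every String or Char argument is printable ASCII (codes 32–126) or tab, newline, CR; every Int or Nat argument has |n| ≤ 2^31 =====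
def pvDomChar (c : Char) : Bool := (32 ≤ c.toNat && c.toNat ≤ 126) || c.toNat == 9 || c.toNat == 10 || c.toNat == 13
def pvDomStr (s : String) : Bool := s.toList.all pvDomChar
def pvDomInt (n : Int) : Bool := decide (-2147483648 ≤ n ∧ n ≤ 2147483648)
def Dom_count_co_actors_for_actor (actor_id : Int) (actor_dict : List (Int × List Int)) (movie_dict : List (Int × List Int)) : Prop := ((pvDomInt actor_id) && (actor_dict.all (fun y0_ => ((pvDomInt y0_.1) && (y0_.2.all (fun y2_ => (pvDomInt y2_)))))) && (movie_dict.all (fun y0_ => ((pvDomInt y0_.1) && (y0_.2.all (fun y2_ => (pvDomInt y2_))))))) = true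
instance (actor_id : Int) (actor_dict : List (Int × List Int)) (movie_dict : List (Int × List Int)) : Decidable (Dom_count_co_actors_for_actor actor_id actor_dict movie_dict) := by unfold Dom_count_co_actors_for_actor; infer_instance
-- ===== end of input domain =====

-- B counts distinct co-actors by sort-then-scan (concatenate all casts, sort, count elements
-- that differ from their predecessor and from the actor), instead of A's dict of flags.


-- ===== PORT A =====
def count_co_actors_for_actor (actor_id : Int) (actor_dict : List (Int × List Int)) (movie_dict : List (Int × List Int)) : Int :=
  let ad : PySem.Dict Int (List Int) := PySem.Dict.ofList actor_dict
  let md : PySem.Dict Int (List Int) := PySem.Dict.ofList movie_dict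
  let movies := ad.getD actor_id []          -- total form; Pre_ guarantees the key is present
  let co_actors := movies.foldl (fun (co : PySem.Dict Int Int) movie =>
      (md.getD movie []).foldl (fun co actor =>
        if actor ≠ actor_id then co.insert actor 1 else co) co)
    PySem.Dict.empty
  (co_actors.size : Int)

-- ===== PORT B =====
def count_co_actors_for_actor_alt (actor_id : Int) (actor_dict : List (Int × List Int)) (movie_dict : List (Int × List Int)) : Int :=
  let ad : PySem.Dict Int (List Int) := PySem.Dict.ofList actor_dict
  let md : PySem.Dict Int (List Int) := PySem.Dict.ofList movie_dict
  let all_cast := (ad.getD actor_id []).foldl (fun acc movie => acc ++ md.getD movie []) []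
  let sorted := PySem.List.sorted all_cast (fun x => x) false
  let res := sorted.foldl (fun (st : Int × Option Int) a =>
      (if a ≠ actor_id ∧ st.2 ≠ some a then st.1 + 1 else st.1, some a)) (0, none)
  res.1

-- ===== PRECONDITION & SPEC =====
-- Pre_ excludes exactly the inputs where Python A raises KeyError: actor_id missing from
-- actor_dict, or one of the actor's movies missing from movie_dict (B raises there too).
def Pre_count_co_actors_for_actor (actor_id : Int) (actor_dict : List (Int × List Int)) (movie_dict : List (Int × List Int)) : Prop :=
  (PySem.Dict.ofList actor_dict).contains actor_id = true ∧
  ∀ m ∈ (PySem.Dict.ofList actor_dict).getD actor_id [], (PySem.Dict.ofList movie_dict).contains m = true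
instance (actor_id : Int) (actor_dict : List (Int × List Int)) (movie_dict : List (Int × List Int)) : Decidable (Pre_count_co_actors_for_actor actor_id actor_dict movie_dict) := by unfold Pre_count_co_actors_for_actor; infer_instance

def pvWitness_count_co_actors_for_actor : Int × (List (Int × List Int)) × (List (Int × List Int)) :=
  (1, [(1, [10, 11])], [(10, [1, 2, 3]), (11, [1, 3, 4])])

def Spec_count_co_actors_for_actor (actor_id : Int) (actor_dict : List (Int × List Int)) (movie_dict : List (Int × List Int)) (out : Int) : Prop := out = count_co_actors_for_actor_alt actor_id actor_dict movie_dict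
instance (actor_id : Int) (actor_dict : List (Int × List Int)) (movie_dict : List (Int × List Int)) (out : Int) : Decidable (Spec_count_co_actors_for_actor actor_id actor_dict movie_dict out) := by unfold Spec_count_co_actors_for_actor; infer_instance

-- ===== CLAIM (what is proved, stated in full; the proofs are below) =====
def Claim_equal_count_co_actors_for_actor : Prop := ∀ (actor_id : Int) (actor_dict : List (Int × List Int)) (movie_dict : List (Int × List Int)), Dom_count_co_actors_for_actor actor_id actor_dict movie_dict → Pre_count_co_actors_for_actor actor_id actor_dict movie_dict → Spec_count_co_actors_for_actor actor_id actor_dict movie_dict (count_co_actors_for_actor actor_id actor_dict movie_dict)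

-- ===== LEMMAS AND PROOFS =====

-- A's inner loop: keys after filtering-inserting a cast.
theorem keysA_inner (aid : Int) (cast : List Int) (co : PySem.Dict Int Int) (x : Int) :
    x ∈ (cast.foldl (fun co actor => if actor ≠ aid then co.insert actor 1 else co) co).keys ↔
      x ∈ co.keys ∨ (x ≠ aid ∧ x ∈ cast) := by
  induction cast generalizing co with
  | nil => simp
  | cons a rest ih =>
    simp only [List.foldl_cons]
    by_cases h : a = aid
    · rw [if_neg (by simp [h]), ih, h]
      simp only [List.mem_cons]
      tauto
    · rw [if_pos h, ih]
      simp only [PySem.Dict.mem_keys_insert, List.mem_cons]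
      constructor
      · rintro ((rfl | h1) | h1)
        · exact Or.inr ⟨h, Or.inl rfl⟩
        · exact Or.inl h1
        · exact Or.inr ⟨h1.1, Or.inr h1.2⟩
      · rintro (h1 | ⟨hne, (rfl | h2)⟩)
        · exact Or.inl (Or.inr h1)
        · exact Or.inl (Or.inl rfl)
        · exact Or.inr ⟨hne, h2⟩

theorem nodupA_inner (aid : Int) (cast : List Int) (co : PySem.Dict Int Int)
    (hco : co.keys.Nodup) :
    (cast.foldl (fun co actor => if actor ≠ aid then co.insert actor 1 else co) co).keys.Nodup := by
  induction cast generalizing co with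
  | nil => exact hco
  | cons a rest ih =>
    simp only [List.foldl_cons]
    split
    · exact ih _ (PySem.Dict.nodup_keys_insert _ _ _ hco)
    · exact ih _ hco

-- A's outer loop.
theorem keysA (aid : Int) (md : PySem.Dict Int (List Int)) (movies : List Int)
    (co : PySem.Dict Int Int) (x : Int) :
    x ∈ (movies.foldl (fun (co : PySem.Dict Int Int) movie =>
        (md.getD movie []).foldl (fun co actor =>
          if actor ≠ aid then co.insert actor 1 else co) co) co).keys ↔
      x ∈ co.keys ∨ (x ≠ aid ∧ ∃ m ∈ movies, x ∈ md.getD m []) := by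
  induction movies generalizing co with
  | nil => simp
  | cons m rest ih =>
    simp only [List.foldl_cons]
    rw [ih, keysA_inner]
    simp only [List.mem_cons]
    constructor
    · rintro ((h | h) | h)
      · exact Or.inl h
      · exact Or.inr ⟨h.1, m, Or.inl rfl, h.2⟩
      · exact Or.inr ⟨h.1, h.2.choose, Or.inr h.2.choose_spec.1, h.2.choose_spec.2⟩
    · rintro (h | ⟨hne, mm, (rfl | hmm), hx⟩)
      · exact Or.inl (Or.inl h)
      · exact Or.inl (Or.inr ⟨hne, hx⟩)
      · exact Or.inr ⟨hne, mm, hmm, hx⟩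

theorem nodupA (aid : Int) (md : PySem.Dict Int (List Int)) (movies : List Int)
    (co : PySem.Dict Int Int) (hco : co.keys.Nodup) :
    (movies.foldl (fun (co : PySem.Dict Int Int) movie =>
        (md.getD movie []).foldl (fun co actor =>
          if actor ≠ aid then co.insert actor 1 else co) co) co).keys.Nodup := by
  induction movies generalizing co with
  | nil => exact hco
  | cons m rest ih => exact ih _ (nodupA_inner aid _ _ hco)

-- B's concatenation loop: membership in the flattened cast list.
theorem mem_flat (md : PySem.Dict Int (List Int)) (movies : List Int) (acc : List Int) (x : Int) :
    x ∈ movies.foldl (fun acc movie => acc ++ md.getD movie []) acc ↔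
      x ∈ acc ∨ ∃ m ∈ movies, x ∈ md.getD m [] := by
  induction movies generalizing acc with
  | nil => simp
  | cons m rest ih =>
    simp only [List.foldl_cons]
    rw [ih]
    simp only [List.mem_append, List.mem_cons]
    constructor
    · rintro ((h | h) | ⟨mm, hmm, hx⟩)
      · exact Or.inl h
      · exact Or.inr ⟨m, Or.inl rfl, h⟩
      · exact Or.inr ⟨mm, Or.inr hmm, hx⟩
    · rintro (h | ⟨mm, (rfl | hmm), hx⟩)
      · exact Or.inl (Or.inl h)
      · exact Or.inl (Or.inr hx)
      · exact Or.inr ⟨mm, hmm, hx⟩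

-- B's scan over a sorted list counts the distinct elements ≠ aid not blocked by prev.
theorem scan_count (aid : Int) (xs : List Int) (c : Int) (po : Option Int)
    (hs : xs.Pairwise (· ≤ ·)) (hlb : ∀ p, po = some p → ∀ y ∈ xs, p ≤ y) :
    (xs.foldl (fun (st : Int × Option Int) a =>
        (if a ≠ aid ∧ st.2 ≠ some a then st.1 + 1 else st.1, some a)) (c, po)).1 =
      c + ((xs.toFinset.filter (fun v => v ≠ aid ∧ po ≠ some v)).card : Int) := by
  induction xs generalizing c po with
  | nil => simp
  | cons x rest ih =>
    have hs' := (List.pairwise_cons.mp hs).2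
    have hxle := (List.pairwise_cons.mp hs).1
    simp only [List.foldl_cons]
    rw [ih _ _ hs' (by intro p hp y hy; exact (Option.some.inj hp) ▸ hxle y hy)]
    have hrest : ∀ v ∈ rest.toFinset, v ≠ x → po ≠ some v := by
      intro v hv hvx hpo
      exact hvx (le_antisymm (hxle v (List.mem_toFinset.mp hv))
        (hlb v hpo x List.mem_cons_self)).symm
    have hset : rest.toFinset.filter (fun v => v ≠ aid ∧ (some x : Option Int) ≠ some v) =
        rest.toFinset.filter (fun v => v ≠ aid ∧ po ≠ some v) \ {x} := by
      ext v
      simp only [Finset.mem_filter, Finset.mem_sdiff, Finset.mem_singleton]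
      constructor
      · rintro ⟨hv, hva, hvx⟩
        have hvx' : v ≠ x := fun h => hvx (by rw [h])
        exact ⟨⟨hv, hva, hrest v hv hvx'⟩, hvx'⟩
      · rintro ⟨⟨hv, hva, _⟩, hvx⟩
        exact ⟨hv, hva, fun h => hvx (Option.some.inj h).symm⟩
    rw [hset]
    by_cases hx : x ≠ aid ∧ po ≠ some x
    · rw [if_pos hx]
      have : ((x :: rest).toFinset.filter (fun v => v ≠ aid ∧ po ≠ some v)) =
          insert x (rest.toFinset.filter (fun v => v ≠ aid ∧ po ≠ some v)) := by
        simp only [List.toFinset_cons, Finset.filter_insert, if_pos hx]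
      rw [this]
      have hcard : (insert x (rest.toFinset.filter (fun v => v ≠ aid ∧ po ≠ some v))).card =
          (rest.toFinset.filter (fun v => v ≠ aid ∧ po ≠ some v) \ {x}).card + 1 := by
        rw [Finset.sdiff_singleton_eq_erase, ← Finset.card_erase_add_one (a := x)
          (s := insert x _) (Finset.mem_insert_self _ _), Finset.erase_insert_eq_erase]
      rw [hcard]
      push_cast
      ring
    · rw [if_neg hx]
      have : ((x :: rest).toFinset.filter (fun v => v ≠ aid ∧ po ≠ some v)) =
          rest.toFinset.filter (fun v => v ≠ aid ∧ po ≠ some v) \ {x} := by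
        simp only [List.toFinset_cons, Finset.filter_insert, if_neg hx,
          Finset.sdiff_singleton_eq_erase]
        ext v
        simp only [Finset.mem_erase, Finset.mem_filter]
        constructor
        · rintro ⟨hv, hva, hvp⟩
          by_cases hvx : v = x
          · exact absurd (hvx ▸ And.intro hva hvp) hx
          · exact ⟨hvx, hv, hva, hvp⟩
        · rintro ⟨_, hv, hva, hvp⟩; exact ⟨hv, hva, hvp⟩
      rw [this]

-- ===== VERDICT (by name: the statement is the Claim_ definition above) =====
theorem count_co_actors_for_actor_spec : Claim_equal_count_co_actors_for_actor := by
  intro aid ad md _ _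
  unfold Spec_count_co_actors_for_actor count_co_actors_for_actor count_co_actors_for_actor_alt
  simp only []
  set movies := (PySem.Dict.ofList ad).getD aid [] with hm
  set mdd := PySem.Dict.ofList md with hmd
  set flat := movies.foldl (fun acc movie => acc ++ mdd.getD movie []) [] with hflat
  set srt := PySem.List.sorted flat (fun x => x) false with hsrt
  rw [scan_count aid srt 0 none (by simpa using PySem.List.sorted_pairwise flat (fun x => x))
    (by rintro p ⟨⟩)]
  have hmemsrt : ∀ x : Int, x ∈ srt ↔ x ∈ flat := fun x => by
    rw [hsrt]; exact PySem.List.mem_sorted flat (fun x => x) false x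
  -- A's key list is Nodup with the same members as B's filtered Finset
  have hkeys := nodupA aid mdd movies PySem.Dict.empty PySem.Dict.nodup_keys_empty
  have hA : ((movies.foldl (fun (co : PySem.Dict Int Int) movie =>
      (mdd.getD movie []).foldl (fun co actor =>
        if actor ≠ aid then co.insert actor 1 else co) co) PySem.Dict.empty).size : Int) =
      ((srt.toFinset.filter (fun v => v ≠ aid ∧ (none : Option Int) ≠ some v)).card : Int) := by
    have hlen : (movies.foldl (fun (co : PySem.Dict Int Int) movie =>
        (mdd.getD movie []).foldl (fun co actor =>
          if actor ≠ aid then co.insert actor 1 else co) co) PySem.Dict.empty).keys.toFinset =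
        srt.toFinset.filter (fun v => v ≠ aid ∧ (none : Option Int) ≠ some v) := by
      ext x
      simp only [List.mem_toFinset, Finset.mem_filter, keysA]
      rw [hmemsrt x, mem_flat]
      simp only [List.not_mem_nil, false_or]
      constructor
      · rintro (h | ⟨hne, hex⟩)
        · exact absurd h (by simp [PySem.Dict.empty, PySem.Dict.keys])
        · exact ⟨hex, hne, by simp⟩
      · rintro ⟨hex, hne, _⟩; exact Or.inr ⟨hne, hex⟩
    have := congrArg Finset.card hlen
    rw [List.toFinset_card_of_nodup hkeys] at this
    simp only [PySem.Dict.keys, List.length_map] at this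
    simp only [PySem.Dict.size]
    exact_mod_cast this
  rw [hA]
  ring
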